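-- pv_equiv track=rewrite | github.com/michaelliudl/CodingInterviewPython | com/leetcode/BFS/graph/00296P_h_best meeting point.py | minTotalDistance
-- ===== SOURCE A (Python) =====
-- from typing import List,Deque
--
-- def minTotalDistance(grid: List[List[int]]) -> int:
--
--     # `dim` contains indices from original `grid` of `1`s
--     def minDistOneDim(dim):
--         # `low` `high` are index in `dim`
--         dist = low = 0
--         high = len(dim) - 1
--         while low < high:
--             dist += dim[high] - dim[low]
--             low += 1
--             high -= 1
--         return dist
--
--     if not grid:
--         return 0
--     rows, cols = len(grid), len(grid[0])
--     # Index of `1`s in each dimension should be in ascending order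
--     # Iterate through the dimension to collect index first
--     rowIndexOfTargets, colIndexOfTargets = [], []
--     for row in range(rows):
--         for col in range(cols):
--             if grid[row][col] == 1:
--                 rowIndexOfTargets.append(row)
--     for col in range(cols):
--         for row in range(rows):
--             if grid[row][col] == 1:
--                 colIndexOfTargets.append(col)
--
--     # sum(row - median(row)) + sum(col - median(col))
--     return minDistOneDim(rowIndexOfTargets) + minDistOneDim(colIndexOfTargets)
-- ===== SOURCE B (Python) =====
-- def minTotalDistance(grid):
--     if not grid:
--         return 0
--     cols = len(grid[0])
--     rvals = [i for i, row in enumerate(grid) for v in row[:cols] if v == 1]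
--     cvals = sorted(j for row in grid for j in range(cols) if row[j] == 1)
--
--     def medianCost(vals):
--         if not vals:
--             return 0
--         m = vals[len(vals) // 2]
--         return sum(abs(v - m) for v in vals)
--
--     return medianCost(rvals) + medianCost(cvals)
-- ===== Notes on version B (the rewrite author's own statement) =====
-- stated objective: alternative
-- what changed: B gathers the 1-coordinates with enumerate (rows) and a single row-major scan plus sort (columns), then for each coordinate list picks the median element at index len//2 and sums |v - median| in one linear pass, instead of A's column-major double scan and two-pointer end-to-end pairing loop.
import Mathlib
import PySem

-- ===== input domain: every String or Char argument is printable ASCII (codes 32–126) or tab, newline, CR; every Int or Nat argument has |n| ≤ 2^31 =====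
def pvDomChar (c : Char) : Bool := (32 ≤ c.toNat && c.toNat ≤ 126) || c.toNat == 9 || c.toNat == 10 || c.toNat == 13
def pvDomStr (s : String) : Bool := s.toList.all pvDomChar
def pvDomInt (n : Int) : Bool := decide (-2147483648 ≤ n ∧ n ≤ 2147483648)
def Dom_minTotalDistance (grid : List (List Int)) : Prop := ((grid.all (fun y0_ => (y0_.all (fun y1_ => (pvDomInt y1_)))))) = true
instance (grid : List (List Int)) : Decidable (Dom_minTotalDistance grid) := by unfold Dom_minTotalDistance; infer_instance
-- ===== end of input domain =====

-- B replaces A's two-pointer end-to-end pairing by an explicit median pick plus a single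
-- |v - median| scan, and gathers the column coordinates row-major and sorts them instead
-- of A's column-major double scan (objective: alternative decomposition; the timing
-- run measured B faster by a constant factor).

-- ===== PORT A =====
-- the `while low < high` loop of A's helper minDistOneDim
def minDistLoop (dim : List Int) (dist low high : Int) : Int :=
  if _h : low < high then
    minDistLoop dim
      (dist + (((PySem.List.pyGet? dim high).getD 0) - ((PySem.List.pyGet? dim low).getD 0)))
      (low + 1) (high - 1)
  else dist
termination_by (high - low).toNat
decreasing_by omega

def minDistOneDim (dim : List Int) : Int :=
  minDistLoop dim 0 0 ((dim.length : Int) - 1)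

def minTotalDistance (grid : List (List Int)) : Int :=
  if grid = [] then 0
  else
    let rows : Int := grid.length
    let cols : Int := (PySem.List.pyGetD grid 0 []).length
    let rowIdx : List Int := (PySem.List.pyRange 0 rows 1).foldl (fun acc row =>
      (PySem.List.pyRange 0 cols 1).foldl (fun acc2 col =>
        if PySem.List.pyGetD (PySem.List.pyGetD grid row []) col 0 == 1
        then acc2 ++ [row] else acc2) acc) []
    let colIdx : List Int := (PySem.List.pyRange 0 cols 1).foldl (fun acc col =>
      (PySem.List.pyRange 0 rows 1).foldl (fun acc2 row =>
        if PySem.List.pyGetD (PySem.List.pyGetD grid row []) col 0 == 1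
        then acc2 ++ [col] else acc2) acc) []
    minDistOneDim rowIdx + minDistOneDim colIdx

-- ===== PORT B =====
def medianCost (vals : List Int) : Int :=
  if vals = [] then 0
  else
    let m := (PySem.List.pyGet? vals (PySem.Int.floordiv (vals.length : Int) 2)).getD 0
    (vals.map (fun v => |v - m|)).sum

def minTotalDistance_alt (grid : List (List Int)) : Int :=
  if grid = [] then 0
  else
    let cols := (PySem.List.pyGetD grid 0 []).length
    let rvals : List Int := (PySem.List.enumerate grid).flatMap (fun p =>
      ((p.2.take cols).filter (fun v => v == 1)).map (fun _ => p.1))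
    let cvals : List Int := PySem.List.sorted
      (grid.flatMap (fun row =>
        (PySem.List.pyRange 0 (cols : Int) 1).filter (fun j => PySem.List.pyGetD row j 0 == 1)))
      (fun x => x) false
    medianCost rvals + medianCost cvals

-- ===== PRECONDITION & SPEC =====
-- Pre_ excludes exactly the ragged grids on which A raises IndexError
-- (a row shorter than the first row); A returns normally on everything else.
def Pre_minTotalDistance (grid : List (List Int)) : Prop :=
  ∀ row ∈ grid, (grid.headD []).length ≤ row.length
instance (grid : List (List Int)) : Decidable (Pre_minTotalDistance grid) := by
  unfold Pre_minTotalDistance; infer_instance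

def pvWitness_minTotalDistance : List (List Int) := [[1, 0, 1], [0, 0, 0], [1, 0, 1]]

def Spec_minTotalDistance (grid : List (List Int)) (out : Int) : Prop := out = minTotalDistance_alt grid
instance (grid : List (List Int)) (out : Int) : Decidable (Spec_minTotalDistance grid out) := by unfold Spec_minTotalDistance; infer_instance

-- ===== CLAIM (what is proved, stated in full; the proofs are below) =====
def Claim_equal_minTotalDistance : Prop := ∀ (grid : List (List Int)), Dom_minTotalDistance grid → Pre_minTotalDistance grid → Spec_minTotalDistance grid (minTotalDistance grid)

-- ===== LEMMAS AND PROOFS =====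

-- pairG strips the first and last element of the list and sums their difference:
-- the mathematical shape of A's two-pointer loop.
def pairG : List Int → Int
  | [] => 0
  | [_] => 0
  | a :: b :: rest => (b :: rest).getLast (by simp) - a + pairG ((b :: rest).dropLast)
termination_by l => l.length
decreasing_by simp

theorem pairG_short (l : List Int) (h : l.length ≤ 1) : pairG l = 0 := by
  match l, h with
  | [], _ => simp [pairG]
  | [_], _ => simp [pairG]

theorem pairG_cons_append (a b : Int) (inner : List Int) :
    pairG (a :: (inner ++ [b])) = b - a + pairG inner := by
  match inner with
  | [] => simp [pairG]
  | c :: rest =>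
    show pairG (a :: c :: (rest ++ [b])) = _
    rw [pairG, show (c :: (rest ++ [b])).dropLast = c :: rest by
      rw [← List.cons_append]; exact List.dropLast_concat]
    simp

theorem minDistLoop_eq_pairG : ∀ (n : Nat) (mid : List Int), mid.length = n →
    ∀ (pre post : List Int) (dist : Int),
      minDistLoop (pre ++ mid ++ post) dist (pre.length : Int)
        ((pre.length : Int) + (mid.length : Int) - 1) = dist + pairG mid := by
  intro n
  induction n using Nat.strong_induction_on with
  | _ n ih =>
    intro mid hn pre post dist
    by_cases hlen : mid.length ≤ 1
    · rw [minDistLoop, dif_neg (by omega), pairG_short mid hlen]; ring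
    · match mid, hn with
      | a :: tail, hn =>
        have htne : tail ≠ [] := by intro h; subst h; simp at hlen
        set bv := tail.getLast htne with hbv
        set inner := tail.dropLast with hinner
        have hdec : tail = inner ++ [bv] := (List.dropLast_append_getLast htne).symm
        have hL : pre ++ (a :: tail) ++ post = pre ++ a :: (tail ++ post) := by simp
        have hL2 : pre ++ (a :: tail) ++ post = (pre ++ a :: inner) ++ bv :: post := by
          rw [hdec]; simp
        have hmlen : (a :: tail).length = inner.length + 2 := by
          rw [hdec]; simp
        rw [minDistLoop, dif_pos (by rw [hmlen]; push_cast; omega)]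
        have hget_low : PySem.List.pyGet? (pre ++ (a :: tail) ++ post) (pre.length : Int) = some a := by
          rw [hL]; exact PySem.List.pyGet?_append_length _ _ _
        have hidx : ((pre.length : Int) + ((a :: tail).length : Int) - 1) = (((pre ++ a :: inner).length : Nat) : Int) := by
          rw [hmlen]; simp [List.length_append]; omega
        have hget_high : PySem.List.pyGet? (pre ++ (a :: tail) ++ post)
            ((pre.length : Int) + ((a :: tail).length : Int) - 1) = some bv := by
          rw [hidx, hL2]; exact PySem.List.pyGet?_append_length _ _ _
        rw [hget_low, hget_high]
        have hrec := ih inner.length (by omega) inner rfl (pre ++ [a]) (bv :: post)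
          (dist + (bv - a))
        have hLrec : pre ++ (a :: tail) ++ post = (pre ++ [a]) ++ inner ++ (bv :: post) := by
          rw [hdec]; simp
        rw [hLrec, show ((pre.length : Int) + 1) = ((pre ++ [a]).length : Int) by simp,
          show ((pre.length : Int) + ((a :: tail).length : Int) - 1 - 1) = (((pre ++ [a]).length : Int) + (inner.length : Int) - 1) by rw [hmlen]; simp; ring]
        simp only [Option.getD_some]
        rw [hrec]
        rw [show a :: tail = a :: (inner ++ [bv]) by rw [hdec], pairG_cons_append]
        ring

theorem minDistOneDim_eq_pairG (dim : List Int) : minDistOneDim dim = pairG dim := by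
  have h := minDistLoop_eq_pairG dim.length dim rfl [] [] 0
  simpa [minDistOneDim] using h

theorem pairG_eq_absSum : ∀ (n : Nat) (l : List Int), l.length = n → l.Pairwise (· ≤ ·) →
    pairG l = (l.map (fun v => |v - l.getD (l.length / 2) 0|)).sum := by
  intro n
  induction n using Nat.strong_induction_on with
  | _ n ih =>
    intro l hn hs
    match l, hn with
    | [], _ => simp [pairG]
    | [x], _ => simp [pairG]
    | a :: b :: rest, hn =>
      set tail := b :: rest with htail
      have htne : tail ≠ [] := by simp [htail]
      set bv := tail.getLast htne with hbv
      set inner := tail.dropLast with hinner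
      have hdec : tail = inner ++ [bv] := (List.dropLast_append_getLast htne).symm
      have hl : a :: tail = a :: (inner ++ [bv]) := by rw [hdec]
      set k := inner.length with hk
      have hlen : (a :: tail).length = k + 2 := by rw [hdec]; simp [hk]
      set m := (a :: tail).getD ((a :: tail).length / 2) 0 with hm
      have hidx : (a :: tail).length / 2 = k / 2 + 1 := by rw [hlen]; omega
      have hm2 : m = (inner ++ [bv]).getD (k / 2) 0 := by
        rw [hm, hidx, hdec]; simp
      have hmem : a ≤ m ∧ m ≤ bv := by
        have hget : ∀ (i j : Nat) (hi : i < (a :: tail).length) (hj : j < (a :: tail).length),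
            i ≤ j → (a :: tail)[i] ≤ (a :: tail)[j] := by
          intro i j hi hj hij
          rcases Nat.lt_or_ge i j with h | h
          · exact (List.pairwise_iff_getElem.mp hs) i j hi hj h
          · have : i = j := by omega
            subst this; rfl
        have h0 : (a :: tail)[0]'(by simp) = a := rfl
        have hlast : (a :: tail)[(a :: tail).length - 1]'(by rw [hlen]; omega) = bv := by
          have h1 : (a :: tail).getLast (by simp) = bv := by rw [List.getLast_cons htne]
          simpa [List.getLast_eq_getElem] using h1
        have hmid : (a :: tail)[(a :: tail).length / 2]'(by rw [hlen]; omega) = m := by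
          rw [hm]
          exact (List.getD_eq_getElem _ _ _).symm
        constructor
        · rw [← h0, ← hmid]
          exact hget 0 _ (by simp) (by rw [hlen]; omega) (by omega)
        · rw [← hmid, ← hlast]
          exact hget _ _ (by rw [hlen]; omega) (by rw [hlen]; omega) (by rw [hlen]; omega)
      have hinner_sorted : inner.Pairwise (· ≤ ·) := by
        refine List.Pairwise.sublist ?_ hs
        rw [hl]
        exact (inner.sublist_append_left [bv]).cons a
      rw [show (a :: tail).map (fun v => |v - m|) = |a - m| :: inner.map (fun v => |v - m|) ++ [|bv - m|] by rw [hl]; simp]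
      rw [hl, pairG_cons_append]
      simp only [List.sum_append, List.sum_cons, List.sum_nil]
      rw [abs_of_nonpos (by omega : a - m ≤ 0), abs_of_nonneg (by omega : 0 ≤ bv - m)]
      rcases List.eq_nil_or_concat inner with hnil | hcons
      · rw [hnil, pairG_short _ (by simp)]
        simp only [List.map_nil, List.sum_nil]
        ring
      · have hk1 : 1 ≤ k := by
          obtain ⟨l', b', hq⟩ := hcons
          rw [hk, hq]; simp
        have hklt : k / 2 < k := by omega
        have hm3 : m = inner.getD (k / 2) 0 := by
          rw [hm2, List.getD_append _ _ _ _ hklt]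
        have hrec := ih k (by omega) inner rfl hinner_sorted
        rw [← hk] at hrec
        rw [hrec, ← hm3]
        ring

theorem medianCost_eq_absSum (l : List Int) :
    medianCost l = (l.map (fun v => |v - l.getD (l.length / 2) 0|)).sum := by
  cases l with
  | nil => simp [medianCost]
  | cons x xs =>
    rw [medianCost, if_neg (by simp)]
    have h2 : PySem.Int.floordiv ((x :: xs).length : Int) 2 = (((x :: xs).length / 2 : Nat) : Int) := by
      exact_mod_cast PySem.Int.floordiv_natCast (x :: xs).length 2
    rw [h2, PySem.List.pyGet?_natCast]
    simp [List.getD_eq_getElem?_getD]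

theorem pairG_eq_medianCost (l : List Int) (hs : l.Pairwise (· ≤ ·)) :
    pairG l = medianCost l := by
  rw [medianCost_eq_absSum]
  exact pairG_eq_absSum l.length l rfl hs

theorem pyGetD_zero_headD (grid : List (List Int)) :
    PySem.List.pyGetD grid 0 [] = grid.headD [] := by
  cases grid <;> simp [PySem.List.pyGetD, PySem.List.pyGet?, PySem.List.pyIdx?]

theorem take_eq_map_range (row : List Int) (C : Nat) (h : C ≤ row.length) :
    row.take C = (PySem.List.pyRange 0 (C:Int)).map (fun col => PySem.List.pyGetD row col 0) := by
  rw [PySem.List.pyRange_zero_nat, List.map_map]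
  apply List.ext_getElem
  · simp [h]
  · intro i h1 h2
    simp at h1 h2 ⊢
    rw [List.getElem?_eq_getElem (by omega)]; rfl

theorem sum_map_pick (C : Nat) (f : Int → Nat) (v : Int) (h0 : 0 ≤ v) (h1 : v < (C:Nat)) :
    ((PySem.List.pyRange 0 (C:Int)).map (fun col => if v == col then f col else 0)).sum = f v := by
  induction C with
  | zero => exact absurd h1 (by simp; omega)
  | succ n ihn =>
    rw [show ((n+1 : Nat) : Int) = (n : Int) + 1 by push_cast; ring,
      PySem.List.pyRange_one_succ_right (by positivity), List.map_append, List.sum_append]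
    by_cases hv : v < (n : Int)
    · rw [ihn hv]
      simp
      omega
    · have hveq : v = (n : Int) := by omega
      have : ((PySem.List.pyRange 0 (n:Int)).map (fun col => if v == col then f col else 0)).sum = 0 := by
        apply List.sum_eq_zero
        intro x hx
        obtain ⟨col, hcol, rfl⟩ := List.mem_map.mp hx
        have := PySem.List.mem_pyRange_one.mp hcol
        simp [show ¬ (v = col) by omega]
      rw [this, hveq]
      simp

theorem pairwise_le_flatMap_const (l : List Int) (g : Int → List Int)
    (hl : l.Pairwise (· < ·)) (hc : ∀ x ∈ l, ∀ y ∈ g x, y = x) :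
    (l.flatMap g).Pairwise (· ≤ ·) := by
  rw [List.flatMap_def, List.pairwise_flatten]
  constructor
  · intro b hb
    obtain ⟨x, hx, rfl⟩ := List.mem_map.mp hb
    rw [List.pairwise_iff_getElem]
    intro i j hi hj _
    rw [hc x hx _ (List.getElem_mem hi), hc x hx _ (List.getElem_mem hj)]
  · rw [List.pairwise_map]
    refine hl.imp_of_mem ?_
    intro x y hx hy hxy a ha b hb
    rw [hc x hx a ha, hc y hy b hb]
    omega

theorem col_perm (grid : List (List Int)) (C : Nat) :
    (grid.flatMap (fun row => (PySem.List.pyRange 0 (C:Int)).filter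
        (fun j => PySem.List.pyGetD row j 0 == 1))).Perm
    ((PySem.List.pyRange 0 (C:Int)).flatMap (fun col =>
        ((PySem.List.pyRange 0 (grid.length : Int)).filter
          (fun r => PySem.List.pyGetD (PySem.List.pyGetD grid r []) col 0 == 1)).map (fun _ => col))) := by
  rw [List.perm_iff_count]
  intro v
  by_cases hv : 0 ≤ v ∧ v < (C : Int)
  · rw [List.flatMap_def, List.count_flatten, List.map_map]
    rw [List.flatMap_def, List.count_flatten, List.map_map]
    have hleft : ∀ row : List Int,
        ((PySem.List.pyRange 0 (C:Int)).filter (fun j => PySem.List.pyGetD row j 0 == 1)).count v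
          = if PySem.List.pyGetD row v 0 == 1 then 1 else 0 := by
      intro row
      by_cases hp : PySem.List.pyGetD row v 0 == 1
      · rw [List.count_filter (p := fun j => PySem.List.pyGetD row j 0 == 1) (a := v) hp,
          List.count_eq_one_of_mem (PySem.List.nodup_pyRange_one 0 (C:Int))
            (PySem.List.mem_pyRange_one.mpr hv)]
        simp [hp]
      · rw [if_neg (by simpa using hp)]
        apply List.count_eq_zero_of_not_mem
        intro hmem
        exact hp (List.of_mem_filter (p := fun j => PySem.List.pyGetD row j 0 == 1) hmem)
    have hL : (grid.map (Function.comp (List.count v) (fun row => (PySem.List.pyRange 0 (C:Int)).filter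
        (fun j => PySem.List.pyGetD row j 0 == 1)))).sum
        = grid.countP (fun row => PySem.List.pyGetD row v 0 == 1) := by
      rw [show (grid.map (Function.comp (List.count v) (fun row => (PySem.List.pyRange 0 (C:Int)).filter
        (fun j => PySem.List.pyGetD row j 0 == 1)))) = grid.map (fun row => if PySem.List.pyGetD row v 0 == 1 then 1 else 0) from List.map_congr_left (fun row _ => hleft row)]
      exact PySem.List.sum_map_ite_one_zero_nat _ _
    rw [hL]
    have hR : ∀ col : Int,
        (((PySem.List.pyRange 0 (grid.length : Int)).filter
          (fun r => PySem.List.pyGetD (PySem.List.pyGetD grid r []) col 0 == 1)).map (fun _ => col)).count v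
        = if v == col then ((PySem.List.pyRange 0 (grid.length : Int)).filter
          (fun r => PySem.List.pyGetD (PySem.List.pyGetD grid r []) col 0 == 1)).length else 0 := by
      intro col
      by_cases h : v = col
      · subst h; rw [List.map_const', List.count_replicate]
      · rw [List.map_const', List.count_replicate]
        simp [h, Ne.symm h]
    rw [show ((PySem.List.pyRange 0 (C:Int)).map (Function.comp (List.count v) _)) = ((PySem.List.pyRange 0 (C:Int)).map (fun col => if v == col then ((PySem.List.pyRange 0 (grid.length : Int)).filter
          (fun r => PySem.List.pyGetD (PySem.List.pyGetD grid r []) col 0 == 1)).length else 0)) from List.map_congr_left (fun col _ => hR col)]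
    rw [sum_map_pick _ _ _ hv.1 hv.2]
    rw [← List.countP_eq_length_filter]
    conv_rhs => rw [show (fun r => PySem.List.pyGetD (PySem.List.pyGetD grid r []) v 0 == 1)
        = ((fun row => PySem.List.pyGetD row v 0 == 1) ∘ (fun j => PySem.List.pyGetD grid j [])) from rfl,
      show (PySem.List.pyRange 0 (grid.length : Int)) = (PySem.List.pyRange 0 (PySem.List.len grid)) from rfl,
      ← List.countP_map, PySem.List.map_pyGetD_pyRange_zero grid ([] : List Int)]
  · rw [List.count_eq_zero_of_not_mem, List.count_eq_zero_of_not_mem]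
    · intro hmem
      obtain ⟨col, hcol, hv2⟩ := List.mem_flatMap.mp hmem
      obtain ⟨_, _, rfl⟩ := List.mem_map.mp hv2
      exact hv (PySem.List.mem_pyRange_one.mp hcol)
    · intro hmem
      obtain ⟨row, _, hv2⟩ := List.mem_flatMap.mp hmem
      exact hv (PySem.List.mem_pyRange_one.mp (List.mem_of_mem_filter hv2))

-- characterisation of A's row-collecting double loop as a flatMap
theorem rowfold_char (grid : List (List Int)) (R C : Int) :
    (PySem.List.pyRange 0 R).foldl (fun acc row =>
      (PySem.List.pyRange 0 C).foldl (fun acc2 col =>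
        if PySem.List.pyGetD (PySem.List.pyGetD grid row []) col 0 == 1
        then acc2 ++ [row] else acc2) acc) []
    = (PySem.List.pyRange 0 R).flatMap (fun row =>
        ((PySem.List.pyRange 0 C).filter
          (fun col => PySem.List.pyGetD (PySem.List.pyGetD grid row []) col 0 == 1)).map (fun _ => row)) := by
  rw [PySem.List.foldl_congr_mem _ _
    (fun acc row => acc ++ ((PySem.List.pyRange 0 C).filter
      (fun col => PySem.List.pyGetD (PySem.List.pyGetD grid row []) col 0 == 1)).map (fun _ => row)) _
    (fun acc row _ => PySem.List.foldl_append_if _ _ _ _),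
    PySem.List.foldl_append_eq_flatMap, List.nil_append]

-- characterisation of A's column-collecting double loop as a flatMap
theorem colfold_char (grid : List (List Int)) (R C : Int) :
    (PySem.List.pyRange 0 C).foldl (fun acc col =>
      (PySem.List.pyRange 0 R).foldl (fun acc2 row =>
        if PySem.List.pyGetD (PySem.List.pyGetD grid row []) col 0 == 1
        then acc2 ++ [col] else acc2) acc) []
    = (PySem.List.pyRange 0 C).flatMap (fun col =>
        ((PySem.List.pyRange 0 R).filter
          (fun row => PySem.List.pyGetD (PySem.List.pyGetD grid row []) col 0 == 1)).map (fun _ => col)) := by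
  rw [PySem.List.foldl_congr_mem _ _
    (fun acc col => acc ++ ((PySem.List.pyRange 0 R).filter
      (fun row => PySem.List.pyGetD (PySem.List.pyGetD grid row []) col 0 == 1)).map (fun _ => col)) _
    (fun acc col _ => PySem.List.foldl_append_if _ _ _ _),
    PySem.List.foldl_append_eq_flatMap, List.nil_append]

-- B's enumerate-based row gathering equals A's index-based flatMap (under Pre_)
theorem rvals_eq_rowflat (grid : List (List Int))
    (hpre : ∀ row ∈ grid, (grid.headD []).length ≤ row.length) :
    (PySem.List.enumerate grid).flatMap (fun p =>
      ((p.2.take (grid.headD []).length).filter (fun v => v == 1)).map (fun _ => p.1))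
    = (PySem.List.pyRange 0 (grid.length : Int)).flatMap (fun row =>
        ((PySem.List.pyRange 0 (((grid.headD []).length : Nat) : Int)).filter
          (fun col => PySem.List.pyGetD (PySem.List.pyGetD grid row []) col 0 == 1)).map (fun _ => row)) := by
  rw [PySem.List.enumerate_eq_map_pyRange grid ([] : List Int), List.flatMap_map]
  apply List.flatMap_congr
  intro j hj
  have hj' := PySem.List.mem_pyRange_one.mp hj
  have hrowmem : PySem.List.pyGetD grid j [] ∈ grid := by
    obtain ⟨k, hk⟩ : ∃ k : Nat, (k : Int) = j := ⟨j.toNat, by omega⟩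
    have hklt : k < grid.length := by
      have := hj'.2
      simp [PySem.List.len] at this
      omega
    rw [← hk, PySem.List.pyGetD_natCast, List.getD_eq_getElem _ _ hklt]
    exact List.getElem_mem _
  have hC := hpre _ hrowmem
  rw [take_eq_map_range _ _ hC, List.filter_map, List.map_map]
  rfl

-- B's sorted row-major column list equals A's column-major flatMap
theorem cvals_eq_colflat (grid : List (List Int)) (C : Nat) :
    PySem.List.sorted (grid.flatMap (fun row =>
        (PySem.List.pyRange 0 (C : Int)).filter (fun j => PySem.List.pyGetD row j 0 == 1)))
      (fun x => x) false
    = (PySem.List.pyRange 0 (C : Int)).flatMap (fun col =>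
        ((PySem.List.pyRange 0 (grid.length : Int)).filter
          (fun row => PySem.List.pyGetD (PySem.List.pyGetD grid row []) col 0 == 1)).map (fun _ => col)) := by
  apply PySem.List.eq_of_perm_of_pairwise_le_of_injective (fun x => x) (fun _ _ h => h)
  · exact (PySem.List.sorted_perm _ _ _).trans (col_perm grid C)
  · exact PySem.List.sorted_pairwise _ _
  · apply pairwise_le_flatMap_const _ _ (PySem.List.pairwise_lt_pyRange_one _ _)
    intro x _ y hy
    obtain ⟨_, _, rfl⟩ := List.mem_map.mp hy
    rfl

theorem rowflat_pairwise (grid : List (List Int)) (R C : Int) :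
    ((PySem.List.pyRange 0 R).flatMap (fun row =>
        ((PySem.List.pyRange 0 C).filter
          (fun col => PySem.List.pyGetD (PySem.List.pyGetD grid row []) col 0 == 1)).map (fun _ => row))).Pairwise (· ≤ ·) := by
  apply pairwise_le_flatMap_const _ _ (PySem.List.pairwise_lt_pyRange_one _ _)
  intro x _ y hy
  obtain ⟨_, _, rfl⟩ := List.mem_map.mp hy
  rfl

theorem colflat_pairwise (grid : List (List Int)) (R C : Int) :
    ((PySem.List.pyRange 0 C).flatMap (fun col =>
        ((PySem.List.pyRange 0 R).filter
          (fun row => PySem.List.pyGetD (PySem.List.pyGetD grid row []) col 0 == 1)).map (fun _ => col))).Pairwise (· ≤ ·) := by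
  apply pairwise_le_flatMap_const _ _ (PySem.List.pairwise_lt_pyRange_one _ _)
  intro x _ y hy
  obtain ⟨_, _, rfl⟩ := List.mem_map.mp hy
  rfl

-- ===== VERDICT (by name: the statement is the Claim_ definition above) =====
theorem minTotalDistance_spec : Claim_equal_minTotalDistance := by
  intro grid _ hpre
  unfold Spec_minTotalDistance
  by_cases hg : grid = []
  · subst hg; rfl
  · simp only [minTotalDistance, minTotalDistance_alt, if_neg hg]
    rw [pyGetD_zero_headD]
    rw [rowfold_char, colfold_char, rvals_eq_rowflat grid hpre, cvals_eq_colflat]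
    rw [minDistOneDim_eq_pairG, minDistOneDim_eq_pairG,
      pairG_eq_medianCost _ (rowflat_pairwise grid _ _),
      pairG_eq_medianCost _ (colflat_pairwise grid _ _)]
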